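-- pv_equiv track=rewrite | github.com/unKNOWN-G/Coding-Practise | Contests/CodeChef Contests/June Challenge 2021/Minimum Dual Area.py | ass
-- ===== SOURCE A (Python) =====
-- def ass(arr):
--     min_val = arr[0][1]
--     max_val = arr[0][1]
--     area_arr = [0]
--     for i in range(1, len(arr)):
--         if (arr[i][1] < min_val):
--             min_val = arr[i][1]
--         elif (arr[i][1] > max_val):
--             max_val = arr[i][1]
--
--         area_arr.append(abs(arr[i][0] - arr[0][0]) * abs(max_val - min_val))
--     if (len(area_arr) == 0):
--         return [0]
--     else:
--         return area_arr
-- ===== SOURCE B (Python) =====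
-- def ass(arr):
--     x0 = arr[0][0]
--     vals = [p[1] for p in arr]
--     pmin, pmax = [], []
--     lo = hi = vals[0]
--     for v in vals:
--         lo = min(lo, v)
--         hi = max(hi, v)
--         pmin.append(lo)
--         pmax.append(hi)
--     return [0] + [abs(p[0] - x0) * (hi - lo)
--                   for p, (lo, hi) in zip(arr[1:], zip(pmin[1:], pmax[1:]))]
-- ===== Notes on version B (the rewrite author's own statement) =====
-- stated objective: alternative
-- what changed: Replaces A's fused index loop with elif min/max updates by a two-pass table design: one pass builds full running-min/running-max tables, a second zip-comprehension reads the tables to produce the areas.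
import Mathlib
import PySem

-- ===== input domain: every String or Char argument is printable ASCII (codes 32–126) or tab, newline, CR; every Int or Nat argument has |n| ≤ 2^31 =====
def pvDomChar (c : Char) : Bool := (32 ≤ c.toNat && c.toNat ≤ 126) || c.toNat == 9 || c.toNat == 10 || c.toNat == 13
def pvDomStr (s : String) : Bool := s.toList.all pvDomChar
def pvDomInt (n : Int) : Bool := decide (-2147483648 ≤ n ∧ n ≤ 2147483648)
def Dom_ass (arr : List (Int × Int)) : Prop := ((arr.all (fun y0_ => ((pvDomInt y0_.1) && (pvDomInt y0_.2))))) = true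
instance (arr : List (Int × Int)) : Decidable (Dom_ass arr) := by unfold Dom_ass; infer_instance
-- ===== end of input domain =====

-- B replaces A's fused scan by two passes: build running-min/max tables, then a zip pass reads them ("alternative" objective).

-- ===== PORT A =====
-- A: one index loop keeping (min_val, max_val) with an elif update, appending areas as it goes.
-- loop body of A's for-loop (x0 = arr[0][0], q = arr[i], state = (min_val, max_val, area_arr))
def assStep (x0 : Int) (s : Int × Int × List Int) (q : Int × Int) : Int × Int × List Int :=
  let mn := if q.2 < s.1 then q.2 else s.1
  let mx := if q.2 < s.1 then s.2.1 else if q.2 > s.2.1 then q.2 else s.2.1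
  (mn, mx, s.2.2 ++ [|q.1 - x0| * |mx - mn|])

def ass (arr : List (Int × Int)) : List Int :=
  let a0 := PySem.List.pyGetD arr 0 ((0 : Int), (0 : Int))
  let st :=
    (PySem.List.pyRange 1 (arr.length : Int) 1).foldl
      (fun s i => assStep a0.1 s (PySem.List.pyGetD arr i ((0 : Int), (0 : Int))))
      (a0.2, a0.2, [(0 : Int)])
  if st.2.2.length = 0 then [0] else st.2.2

-- ===== PORT B =====
-- loop body of B's table-building pass (state = (lo, hi, pmin, pmax))
def altStep (s : Int × Int × List Int × List Int) (v : Int) : Int × Int × List Int × List Int :=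
  let lo := min s.1 v
  let hi := max s.2.1 v
  (lo, hi, s.2.2.1 ++ [lo], s.2.2.2 ++ [hi])

def ass_alt (arr : List (Int × Int)) : List Int :=
  let x0 : Int := (PySem.List.pyGetD arr 0 ((0 : Int), (0 : Int))).1
  let vals := arr.map (·.2)
  let v0 : Int := PySem.List.pyGetD vals 0 0
  let st := vals.foldl altStep (v0, v0, ([] : List Int), ([] : List Int))
  let pmin := st.2.2.1
  let pmax := st.2.2.2
  (0 : Int) ::
    ((PySem.List.slice arr (some 1) none).zip
        ((PySem.List.slice pmin (some 1) none).zip (PySem.List.slice pmax (some 1) none))).map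
      (fun plh => |plh.1.1 - x0| * (plh.2.2 - plh.2.1))

-- ===== PRECONDITION & SPEC =====
-- Pre_ excludes only the empty list, on which A (and B) raise IndexError at arr[0].
def Pre_ass (arr : List (Int × Int)) : Prop := arr ≠ []
instance (arr : List (Int × Int)) : Decidable (Pre_ass arr) := by unfold Pre_ass; infer_instance
def pvWitness_ass : (List (Int × Int)) := [(1, 2), (3, -1)]
def Spec_ass (arr : List (Int × Int)) (out : List Int) : Prop := out = ass_alt arr
instance (arr : List (Int × Int)) (out : List Int) : Decidable (Spec_ass arr out) := by unfold Spec_ass; infer_instance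

-- ===== CLAIM (what is proved, stated in full; the proofs are below) =====
def Claim_equal_ass : Prop := ∀ (arr : List (Int × Int)), Dom_ass arr → Pre_ass arr → Spec_ass arr (ass arr)

-- ===== LEMMAS AND PROOFS =====

-- reference: areas for the tail, given start abscissa x0 and running min/max
def pvRef (x0 mn mx : Int) : List (Int × Int) → List Int
  | [] => []
  | q :: t => (|q.1 - x0| * (max mx q.2 - min mn q.2)) :: pvRef x0 (min mn q.2) (max mx q.2) t

-- running min / max of second components
def pvFmin (m : Int) (t : List (Int × Int)) : Int := t.foldl (fun a q => min a q.2) m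
def pvFmax (m : Int) (t : List (Int × Int)) : Int := t.foldl (fun a q => max a q.2) m

-- A's fold state, characterised
theorem ass_fold (x0 : Int) (t : List (Int × Int)) : ∀ (mn mx : Int) (acc : List Int), mn ≤ mx →
    t.foldl (assStep x0) (mn, mx, acc)
      = (pvFmin mn t, pvFmax mx t, acc ++ pvRef x0 mn mx t) := by
  induction t with
  | nil => intro mn mx acc h; simp [pvFmin, pvFmax, pvRef]
  | cons q t ih =>
      intro mn mx acc h
      have hmn : (if q.2 < mn then q.2 else mn) = min mn q.2 := by
        split_ifs <;> omega
      have hmx : (if q.2 < mn then mx else if q.2 > mx then q.2 else mx) = max mx q.2 := by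
        split_ifs <;> omega
      have habs : |max mx q.2 - min mn q.2| = max mx q.2 - min mn q.2 := by
        exact abs_of_nonneg (sub_nonneg.mpr
          (le_trans (min_le_right _ _) (le_max_right _ _)))
      simp only [List.foldl_cons, assStep, hmn, hmx, habs, pvRef, pvFmin, pvFmax]
      rw [ih (min mn q.2) (max mx q.2) _ (le_trans (min_le_left _ _) (le_trans h (le_max_left _ _)))]
      simp [pvFmin, pvFmax]

-- running-min / running-max scans
def pvScanMin (m : Int) : List Int → List Int
  | [] => []
  | v :: vs => min m v :: pvScanMin (min m v) vs

def pvScanMax (m : Int) : List Int → List Int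
  | [] => []
  | v :: vs => max m v :: pvScanMax (max m v) vs

-- B's fold state, characterised
theorem alt_fold (vs : List Int) : ∀ (lo hi : Int) (pm pM : List Int),
    vs.foldl altStep (lo, hi, pm, pM)
      = (vs.foldl min lo, vs.foldl max hi, pm ++ pvScanMin lo vs, pM ++ pvScanMax hi vs) := by
  induction vs with
  | nil => intro lo hi pm pM; simp [pvScanMin, pvScanMax]
  | cons v vs ih =>
      intro lo hi pm pM
      simp only [List.foldl_cons, altStep, pvScanMin, pvScanMax]
      rw [ih]
      simp

-- the zip-with-scans pass equals the reference
theorem zip_scan_ref (x0 : Int) (t : List (Int × Int)) : ∀ mn mx : Int,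
    (t.zip ((pvScanMin mn (t.map (·.2))).zip (pvScanMax mx (t.map (·.2))))).map
        (fun plh => |plh.1.1 - x0| * (plh.2.2 - plh.2.1))
      = pvRef x0 mn mx t := by
  induction t with
  | nil => intro mn mx; simp [pvRef]
  | cons q t ih =>
      intro mn mx
      simp only [List.map_cons, pvScanMin, pvScanMax, List.zip_cons_cons, pvRef, List.map]
      rw [ih]

theorem ass_eq_alt (arr : List (Int × Int)) (h : Pre_ass arr) : ass arr = ass_alt arr := by
  obtain ⟨p, t, rfl⟩ : ∃ p t, arr = p :: t := by
    cases arr with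
    | nil => exact absurd rfl h
    | cons p t => exact ⟨p, t, rfl⟩
  simp only [ass, ass_alt, List.map_cons, PySem.List.pyGetD_zero_cons,
    PySem.List.slice_from_one]
  rw [PySem.List.foldl_pyRange_pyGetD' (p :: t) ((0 : Int), (0 : Int)) (assStep p.1)
      (p.2, p.2, [(0 : Int)]) (a := 1) (by omega)]
  simp only [show Int.toNat 1 = 1 from rfl, List.drop_succ_cons, List.drop_zero]
  rw [ass_fold p.1 t p.2 p.2 [(0 : Int)] le_rfl]
  rw [alt_fold (p.2 :: t.map (·.2)) p.2 p.2 [] []]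
  simp only [pvScanMin, pvScanMax, min_self, max_self, List.nil_append, List.tail_cons]
  rw [zip_scan_ref p.1 t p.2 p.2]
  simp

-- ===== VERDICT (by name: the statement is the Claim_ definition above) =====
theorem ass_spec : Claim_equal_ass := by
  intro arr _ hpre
  exact ass_eq_alt arr hpre
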